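-- pv_equiv track=rewrite | github.com/jacopomoi/FGMD | takefrag.py | parse
-- ===== SOURCE A (Python) =====
-- def filt(fasta,index_first_res):
--     src = list(fasta)
--     src_filt = []
--
--
--     count = index_first_res
--     for i in src:
--         if i != "-":
--             src_filt.append((count,i))
--             count = count +1
--         else:
--             src_filt.append(i)
--     return src_filt
--
-- def parse(src,trg,match):
--     trg_filt=filt(trg,1)
--     src_filt=filt(src,1)
--
--     ret = []
--     for j in zip(src_filt,trg_filt,match):
--         if j[0]!="-" and j[1]!="-" and j[2]==":":
--             ret.append((j[0],j[1]))
--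
--     return ret
-- ===== SOURCE B (Python) =====
-- def parse(src, trg, match):
--     ret = []
--     src_pos = 1
--     trg_pos = 1
--     for s, t, m in zip(src, trg, match):
--         if s != "-" and t != "-" and m == ":":
--             ret.append(((src_pos, s), (trg_pos, t)))
--         if s != "-":
--             src_pos += 1
--         if t != "-":
--             trg_pos += 1
--     return ret
-- ===== Notes on version B (the rewrite author's own statement) =====
-- stated objective: simpler
-- what changed: Single pass over zip(src, trg, match) with two inline 1-based counters, dropping the filt helper and the two intermediate labeled lists.
import Mathlib
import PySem

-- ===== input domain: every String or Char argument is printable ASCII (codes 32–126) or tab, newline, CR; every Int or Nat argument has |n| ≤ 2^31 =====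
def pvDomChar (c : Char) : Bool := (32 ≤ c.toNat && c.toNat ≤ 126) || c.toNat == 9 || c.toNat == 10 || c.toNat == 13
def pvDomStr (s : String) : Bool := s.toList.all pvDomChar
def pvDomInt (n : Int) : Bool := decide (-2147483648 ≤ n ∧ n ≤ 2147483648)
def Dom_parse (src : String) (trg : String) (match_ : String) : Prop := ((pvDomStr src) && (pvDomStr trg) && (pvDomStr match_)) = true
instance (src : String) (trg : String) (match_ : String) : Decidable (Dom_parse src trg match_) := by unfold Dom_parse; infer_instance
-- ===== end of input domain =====

-- B replaces filt and the two intermediate labeled lists by a single pass over the zipped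
-- strings with two inline 1-based counters (objective: simpler).

-- ===== PORT A =====
-- filt's list holds tuples for residues and the string "-" for gaps: Sum models that.
def stepFilt (st : Int × List (Sum (Int × String) String)) (i : Char) :
    Int × List (Sum (Int × String) String) :=
  if i ≠ '-' then (st.1 + 1, st.2 ++ [Sum.inl (st.1, String.mk [i])])
  else (st.1, st.2 ++ [Sum.inr (String.mk [i])])

def filt (fasta : String) (index_first_res : Int) : List (Sum (Int × String) String) :=
  (fasta.toList.foldl stepFilt (index_first_res, [])).2

-- j[0] != "-" : a tuple is never equal to a string; a string entry is compared with "-".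
def notDash : Sum (Int × String) String → Bool
  | .inl _ => true
  | .inr s => s ≠ "-"

def stepParse (ret : List ((Int × String) × (Int × String)))
    (j : (Sum (Int × String) String × Sum (Int × String) String) × Char) :
    List ((Int × String) × (Int × String)) :=
  if notDash j.1.1 && notDash j.1.2 && (j.2 == ':') then
    match j.1.1, j.1.2 with
    | .inl a, .inl b => ret ++ [(a, b)]
    | _, _ => ret  -- unreachable for filt's output: a string entry there is always "-"
  else ret

def parse (src : String) (trg : String) (match_ : String) :
    List ((Int × String) × (Int × String)) :=
  let trg_filt := filt trg 1
  let src_filt := filt src 1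
  (((src_filt.zip trg_filt).zip match_.toList).foldl stepParse [])

-- ===== PORT B =====
def parseGo : List Char → List Char → List Char → Int → Int →
    List ((Int × String) × (Int × String))
  | s :: ss, t :: ts, m :: ms, sp, tp =>
    let rest := parseGo ss ts ms (if s ≠ '-' then sp + 1 else sp) (if t ≠ '-' then tp + 1 else tp)
    if s ≠ '-' && t ≠ '-' && (m == ':') then
      ((sp, String.mk [s]), (tp, String.mk [t])) :: rest
    else rest
  | _, _, _, _, _ => []

def parse_alt (src : String) (trg : String) (match_ : String) :
    List ((Int × String) × (Int × String)) :=
  parseGo src.toList trg.toList match_.toList 1 1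

-- ===== PRECONDITION & SPEC =====
def Spec_parse (src : String) (trg : String) (match_ : String) (out : List ((Int × String) × (Int × String))) : Prop := out = parse_alt src trg match_
instance (src : String) (trg : String) (match_ : String) (out : List ((Int × String) × (Int × String))) : Decidable (Spec_parse src trg match_ out) := by unfold Spec_parse; infer_instance

-- ===== CLAIM (what is proved, stated in full; the proofs are below) =====
def Claim_equal_parse : Prop := ∀ (src : String) (trg : String) (match_ : String), Dom_parse src trg match_ → Spec_parse src trg match_ (parse src trg match_)

-- ===== LEMMAS AND PROOFS =====
-- Structural form of filt, used to reason about A's foldl.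
def filtRec : List Char → Int → List (Sum (Int × String) String)
  | [], _ => []
  | i :: l, c =>
    if i ≠ '-' then Sum.inl (c, String.mk [i]) :: filtRec l (c + 1)
    else Sum.inr (String.mk [i]) :: filtRec l c

theorem filt_fold (l : List Char) (c : Int) (acc : List (Sum (Int × String) String)) :
    (l.foldl stepFilt (c, acc)).2 = acc ++ filtRec l c := by
  induction l generalizing c acc with
  | nil => simp [filtRec]
  | cons i l ih =>
    by_cases h : i = '-' <;> simp [stepFilt, filtRec, h, ih]

theorem zip_fold (ss ts ms : List Char) (sp tp : Int)
    (acc : List ((Int × String) × (Int × String))) :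
    (((filtRec ss sp).zip (filtRec ts tp)).zip ms).foldl stepParse acc
      = acc ++ parseGo ss ts ms sp tp := by
  induction ss generalizing ts ms sp tp acc with
  | nil => simp [filtRec, parseGo]
  | cons s ss ih =>
    cases ts with
    | nil =>
      by_cases hs : s = '-' <;> simp [filtRec, parseGo, hs]
    | cons t ts =>
      cases ms with
      | nil =>
        by_cases hs : s = '-' <;> by_cases ht : t = '-' <;>
          simp [filtRec, parseGo, hs, ht]
      | cons m ms =>
        by_cases hs : s = '-' <;> by_cases ht : t = '-' <;>
          simp only [filtRec, hs, ht, if_pos, if_neg, ne_eq, not_true_eq_false,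
            not_false_eq_true, ite_true, ite_false, List.zip_cons_cons,
            List.foldl_cons, parseGo, ih] <;>
          by_cases hm : m = ':' <;>
          simp [stepParse, notDash, hs, ht, hm, ih]

theorem parse_spec : Claim_equal_parse := by
  intro src trg match_ _
  show parse src trg match_ = parse_alt src trg match_
  unfold parse parse_alt filt
  rw [filt_fold, filt_fold]
  simpa using zip_fold src.toList trg.toList match_.toList 1 1 []
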